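-- pv_equiv track=rewrite | github.com/rawatjiya/Booktok | spiciness_app.py | label_reviews
-- ===== SOURCE A (Python) =====
-- def label_reviews(reviews, keywords):
--     labels = []
--     for review in reviews:
--         # Check if any keyword is present in the review
--         if any(keyword in review for keyword in keywords):
--             labels.append("Explicit")
--         else:
--             labels.append("Not Explicit")
--     return labels
-- ===== SOURCE B (Python) =====
-- def label_reviews(reviews, keywords):
--     # Keyword-major sweep over a shrinking frontier: each keyword eliminates the
--     # reviews it hits, so matched reviews are never scanned again.
--     unmatched = set(range(len(reviews)))
--     for kw in keywords:
--         unmatched = {i for i in unmatched if kw not in reviews[i]}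
--     return ["Not Explicit" if i in unmatched else "Explicit" for i in range(len(reviews))]
-- ===== Notes on version B (the rewrite author's own statement) =====
-- stated objective: alternative
-- what changed: A goes review-by-review, testing every keyword inside each review; B transposes the traversal: it sweeps keyword-by-keyword over a shrinking set of still-unmatched review indices, so a review is never scanned again once some keyword hit it, and labels are rendered from the final index set.
import Mathlib
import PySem

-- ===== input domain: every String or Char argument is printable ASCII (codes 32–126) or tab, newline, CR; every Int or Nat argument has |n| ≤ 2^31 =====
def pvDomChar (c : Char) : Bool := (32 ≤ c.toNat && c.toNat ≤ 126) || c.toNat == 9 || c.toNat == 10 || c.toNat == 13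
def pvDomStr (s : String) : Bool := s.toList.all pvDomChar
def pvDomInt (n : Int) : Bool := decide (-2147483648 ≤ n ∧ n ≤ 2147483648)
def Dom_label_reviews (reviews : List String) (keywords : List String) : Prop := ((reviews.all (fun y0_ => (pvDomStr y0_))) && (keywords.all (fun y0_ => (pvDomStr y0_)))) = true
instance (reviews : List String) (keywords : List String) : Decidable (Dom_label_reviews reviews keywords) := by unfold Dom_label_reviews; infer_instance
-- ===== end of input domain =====

-- B transposes A's traversal: keyword-major sweep over a shrinking set of unmatched review
-- indices instead of review-major per-keyword tests; same cost, different structure (no speed claim).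


-- ===== PORT A =====
-- A: for each review in order, append "Explicit" iff any keyword is a substring ('in') of it.
def label_reviews (reviews : List String) (keywords : List String) : List String :=
  reviews.foldl (fun labels review =>
    labels ++ [if keywords.any (fun keyword => PySem.Str.isIn keyword review) then "Explicit" else "Not Explicit"]) []

-- ===== PORT B =====
-- B: start from the index set set(range(len(reviews))); each keyword filters out the indices
-- of reviews it occurs in; labels are rendered from membership in the final set.
def label_reviews_alt (reviews : List String) (keywords : List String) : List String :=
  let unmatched := keywords.foldl
    (fun unmatched kw =>
      unmatched.filter (fun i => !PySem.Str.isIn kw (PySem.List.pyGetD reviews i "")))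
    (PySem.Set.ofList (PySem.List.pyRange 0 (reviews.length : Int) 1))
  (PySem.List.pyRange 0 (reviews.length : Int) 1).map
    (fun i => if unmatched.contains i then "Not Explicit" else "Explicit")

-- ===== PRECONDITION & SPEC =====
def Spec_label_reviews (reviews : List String) (keywords : List String) (out : List String) : Prop := out = label_reviews_alt reviews keywords
instance (reviews : List String) (keywords : List String) (out : List String) : Decidable (Spec_label_reviews reviews keywords out) := by unfold Spec_label_reviews; infer_instance

-- ===== CLAIM (what is proved, stated in full; the proofs are below) =====
def Claim_equal_label_reviews : Prop := ∀ (reviews : List String) (keywords : List String), Dom_label_reviews reviews keywords → Spec_label_reviews reviews keywords (label_reviews reviews keywords)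

-- ===== LEMMAS AND PROOFS =====

-- inserting duplicate-free elements into a disjoint set just appends them
theorem pvFoldlAdd {a : Type} [BEq a] [LawfulBEq a] (xs acc : List a)
    (h : (acc ++ xs).Nodup) : xs.foldl PySem.Set.add acc = acc ++ xs := by
  induction xs generalizing acc with
  | nil => simp
  | cons x rest ih =>
    have hx : PySem.Set.contains acc x = false := by
      have hd := (List.nodup_append.mp h).2.2
      simp only [PySem.Set.contains, List.contains_eq_mem, decide_eq_false_iff_not]
      intro hmem
      exact hd x hmem x (by simp) rfl
    simp only [List.foldl_cons, PySem.Set.add, hx, Bool.false_eq_true, if_false]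
    rw [ih (acc ++ [x]) (by simpa using h)]
    simp

-- set(...) of a duplicate-free list is that list
theorem pvDedup_nodup {a : Type} [BEq a] [LawfulBEq a] (xs : List a) (h : xs.Nodup) :
    PySem.Set.ofList xs = xs := by
  rw [PySem.Set.ofList_eq_foldl, pvFoldlAdd xs [] (by simpa using h)]
  simp

-- folding per-keyword filters over an index set is one filter by the conjunction
theorem pvFoldl_filter (reviews : List String) (keywords : List String) (s : List Int) :
    keywords.foldl
      (fun unmatched kw =>
        unmatched.filter (fun i => !PySem.Str.isIn kw (PySem.List.pyGetD reviews i "")))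
      s
    = s.filter (fun i => keywords.all (fun kw => !PySem.Str.isIn kw (PySem.List.pyGetD reviews i ""))) := by
  induction keywords generalizing s with
  | nil => simp
  | cons kw ks ih =>
    simp only [List.foldl_cons, ih, List.filter_filter]
    apply List.filter_congr
    intro i _
    simp [List.all_cons, Bool.and_comm]

-- ===== VERDICT (by name: the statement is the Claim_ definition above) =====
theorem label_reviews_spec : Claim_equal_label_reviews := by
  intro reviews keywords _
  show _ = _
  unfold label_reviews label_reviews_alt
  simp only []
  rw [PySem.List.foldl_append_singleton_eq_map, List.nil_append,
      pvDedup_nodup _ (PySem.List.nodup_pyRange_one 0 (reviews.length : Int)), pvFoldl_filter]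
  refine Eq.symm ?_
  rw [List.map_congr_left (l := PySem.List.pyRange 0 (reviews.length : Int) 1)
        (g := (fun review => if keywords.any (fun keyword => PySem.Str.isIn keyword review) then "Explicit" else "Not Explicit")
              ∘ (fun j => PySem.List.pyGetD reviews j "")) ?_,
      ← List.map_map, PySem.List.map_pyGetD_pyRange_zero']
  intro i hi
  have hc : (PySem.Set.contains ((PySem.List.pyRange 0 (reviews.length : Int) 1).filter
      (fun i => keywords.all (fun kw => !PySem.Str.isIn kw (PySem.List.pyGetD reviews i "")))) i)
      = keywords.all (fun kw => !PySem.Str.isIn kw (PySem.List.pyGetD reviews i "")) := by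
    rw [Bool.eq_iff_iff]
    simp [PySem.Set.contains, List.mem_filter, hi]
  show (if _ then _ else _) = _
  rw [hc]
  simp only [Function.comp]
  rw [show (keywords.all (fun kw => !PySem.Str.isIn kw (PySem.List.pyGetD reviews i "")))
        = !(keywords.any (fun kw => PySem.Str.isIn kw (PySem.List.pyGetD reviews i ""))) from by
      rw [Bool.eq_iff_iff]; simp [List.all_eq_true]]
  cases keywords.any (fun kw => PySem.Str.isIn kw (PySem.List.pyGetD reviews i "")) <;> simp
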